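-- pv_equiv track=rewrite | github.com/WilliamTrouvaille/PyBits | HELLO/hello.py | expand_services
-- ===== SOURCE A (Python) =====
-- def expand_services(values: list[str] | None) -> list[str]:
--     """
--     展开服务别名为标准服务名称列表
--
--     Args:
--         values: 用户指定的服务名称列表
--
--     Returns:
--         标准化的服务名称列表 ["claude", "codex"]
--     """
--     if not values or "all" in values:
--         return ["claude", "codex"]
--
--     out: list[str] = []
--     for value in values:
--         if value in ("claude", "cc", "claude_code"):
--             if "claude" not in out:
--                 out.append("claude")
--         elif value == "codex":
--             if "codex" not in out:
--                 out.append("codex")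
--
--     return out
-- ===== SOURCE B (Python) =====
-- def _first_index(values, names):
--     for i, v in enumerate(values):
--         if v in names:
--             return i
--     return None
--
--
-- def expand_services(values):
--     if not values or "all" in values:
--         return ["claude", "codex"]
--     i = _first_index(values, ("claude", "cc", "claude_code"))
--     j = _first_index(values, ("codex",))
--     if i is None and j is None:
--         return []
--     if j is None:
--         return ["claude"]
--     if i is None:
--         return ["codex"]
--     return ["claude", "codex"] if i < j else ["codex", "claude"]
-- ===== Notes on version B (the rewrite author's own statement) =====
-- stated objective: alternative
-- what changed: Replaces A's accumulate-and-membership-check loop over all elements with a closed-form construction: find the first-occurrence index of each canonical service (claude-alias, codex) and assemble the result by comparing those two indices.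
import Mathlib
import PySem

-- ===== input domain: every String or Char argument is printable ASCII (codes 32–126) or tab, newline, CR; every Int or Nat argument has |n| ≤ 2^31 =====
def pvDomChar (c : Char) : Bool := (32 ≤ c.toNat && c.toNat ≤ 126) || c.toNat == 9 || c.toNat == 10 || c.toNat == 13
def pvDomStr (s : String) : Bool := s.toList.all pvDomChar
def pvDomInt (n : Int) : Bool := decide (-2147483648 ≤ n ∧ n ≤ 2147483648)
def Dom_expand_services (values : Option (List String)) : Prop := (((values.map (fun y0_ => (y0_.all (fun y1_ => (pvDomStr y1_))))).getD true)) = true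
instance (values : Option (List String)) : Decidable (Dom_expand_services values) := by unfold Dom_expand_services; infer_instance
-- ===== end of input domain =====

-- B replaces A's accumulate-and-membership-check loop by a closed-form construction from the
-- first-occurrence index of each canonical service; objective: alternative algorithm, same cost.

-- ===== PORT A =====
def esStep (out : List String) (value : String) : List String :=
  if value = "claude" ∨ value = "cc" ∨ value = "claude_code" then
    if out.contains "claude" then out else out ++ ["claude"]
  else if value = "codex" then
    if out.contains "codex" then out else out ++ ["codex"]
  else out

def expand_services (values : Option (List String)) : List String :=
  match values with
  | none => ["claude", "codex"]
  | some vs =>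
    if vs = [] ∨ vs.contains "all" then ["claude", "codex"]
    else vs.foldl esStep []

-- ===== PORT B =====
-- _first_index: scan with the running index, first hit wins (the `.map (·+1)` is the enumerate counter)
def esFirstIdx (p : String → Bool) : List String → Option Nat
  | [] => none
  | v :: rest => if p v then some 0 else (esFirstIdx p rest).map (· + 1)

def esIsClaude (v : String) : Bool := v == "claude" || v == "cc" || v == "claude_code"

def expand_services_alt (values : Option (List String)) : List String :=
  match values with
  | none => ["claude", "codex"]
  | some vs =>
    if vs = [] ∨ vs.contains "all" then ["claude", "codex"]
    else
      match esFirstIdx esIsClaude vs, esFirstIdx (· == "codex") vs with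
      | none, none => []
      | some _, none => ["claude"]
      | none, some _ => ["codex"]
      | some i, some j => if i < j then ["claude", "codex"] else ["codex", "claude"]

-- ===== PRECONDITION & SPEC =====
def Spec_expand_services (values : Option (List String)) (out : List String) : Prop := out = expand_services_alt values
instance (values : Option (List String)) (out : List String) : Decidable (Spec_expand_services values out) := by unfold Spec_expand_services; infer_instance

-- ===== CLAIM (what is proved, stated in full; the proofs are below) =====
def Claim_equal_expand_services : Prop := ∀ (values : Option (List String)), Dom_expand_services values → Spec_expand_services values (expand_services values)

-- ===== LEMMAS AND PROOFS =====
theorem es_full (vs : List String) (out : List String)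
    (hc : out.contains "claude" = true) (hx : out.contains "codex" = true) :
    vs.foldl esStep out = out := by
  induction vs with
  | nil => rfl
  | cons v rest ih =>
    simp only [List.foldl_cons]
    have : esStep out v = out := by
      unfold esStep; split_ifs <;> simp_all
    rw [this, ih]

theorem es_claude (vs : List String) :
    vs.foldl esStep ["claude"] =
      if (esFirstIdx (· == "codex") vs).isSome then ["claude", "codex"] else ["claude"] := by
  induction vs with
  | nil => rfl
  | cons v rest ih =>
    simp only [List.foldl_cons, esFirstIdx]
    by_cases hx : v = "codex"
    · subst hx
      rw [show esStep ["claude"] "codex" = ["claude", "codex"] from by decide,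
        es_full rest _ (by decide) (by decide)]
      simp
    · have : esStep ["claude"] v = ["claude"] := by
        unfold esStep; split_ifs <;> simp_all
      rw [this, ih]
      simp [hx, Option.isSome_map]

theorem es_codex (vs : List String) :
    vs.foldl esStep ["codex"] =
      if (esFirstIdx esIsClaude vs).isSome then ["codex", "claude"] else ["codex"] := by
  induction vs with
  | nil => rfl
  | cons v rest ih =>
    simp only [List.foldl_cons, esFirstIdx]
    by_cases hc : esIsClaude v = true
    · have : esStep ["codex"] v = ["codex", "claude"] := by
        simp only [esIsClaude, Bool.or_eq_true, beq_iff_eq] at hc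
        unfold esStep; split_ifs <;> simp_all
      rw [this, es_full rest _ (by decide) (by decide)]
      simp [hc]
    · have : esStep ["codex"] v = ["codex"] := by
        simp only [esIsClaude, Bool.or_eq_true, beq_iff_eq, not_or] at hc
        unfold esStep; split_ifs <;> simp_all
      rw [this, ih]
      simp [hc, Option.isSome_map]

theorem es_main (vs : List String) :
    vs.foldl esStep [] =
      match esFirstIdx esIsClaude vs, esFirstIdx (· == "codex") vs with
      | none, none => []
      | some _, none => ["claude"]
      | none, some _ => ["codex"]
      | some i, some j => if i < j then ["claude", "codex"] else ["codex", "claude"] := by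
  induction vs with
  | nil => rfl
  | cons v rest ih =>
    simp only [List.foldl_cons, esFirstIdx]
    by_cases hc : esIsClaude v = true
    · have hx : v ≠ "codex" := by
        intro he; subst he; exact absurd hc (by decide)
      have : esStep [] v = ["claude"] := by
        simp only [esIsClaude, Bool.or_eq_true, beq_iff_eq] at hc
        unfold esStep; split_ifs <;> simp_all
      rw [this, es_claude]
      cases esFirstIdx (· == "codex") rest <;> simp [hc, hx]
    · by_cases hx : v = "codex"
      · subst hx
        rw [show esStep [] "codex" = ["codex"] from by decide, es_codex]
        cases esFirstIdx esIsClaude rest <;>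
          simp [show esIsClaude "codex" = false from by decide]
      · have : esStep [] v = [] := by
          simp only [esIsClaude, Bool.or_eq_true, beq_iff_eq, not_or] at hc
          unfold esStep; split_ifs <;> simp_all
        rw [this, ih]
        cases esFirstIdx esIsClaude rest <;> cases esFirstIdx (· == "codex") rest <;>
          simp [hc, hx]

-- ===== VERDICT (by name: the statement is the Claim_ definition above) =====
theorem expand_services_spec : Claim_equal_expand_services := by
  intro values _
  unfold Spec_expand_services expand_services expand_services_alt
  cases values with
  | none => rfl
  | some vs =>
    by_cases hg : vs = [] ∨ vs.contains "all" = true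
    · simp only [if_pos hg]
    · simp only [if_neg hg]
      exact es_main vs
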